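-- pv_equiv track=rewrite | github.com/Jack-Hall/MiscPythonStuff | multiset generator.py | convertToMulti
-- ===== SOURCE A (Python) =====
-- def convertToMulti(sets):
--     output = []
--     for MS in sets:
--         curr = 0
--         newForm = []
--         for item in MS:
--             if item == 'X':
--                 newForm.append(curr)
--             else:
--                 curr += 1
--         output.append(newForm)
--     return output
-- ===== SOURCE B (Python) =====
-- def convertToMulti(sets):
--     output = []
--     for MS in sets:
--         seq = list(MS)
--         flags = [0 if item == 'X' else 1 for item in seq]
--         prefix = []
--         s = 0
--         for f in flags:
--             s += f
--             prefix.append(s)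
--         output.append([c for item, c in zip(seq, prefix) if item == 'X'])
--     return output
-- ===== Notes on version B (the rewrite author's own statement) =====
-- stated objective: alternative
-- what changed: B replaces A's single mutable counter loop with a pipeline: map the sequence to 0/1 flags, build the inclusive prefix-sum table, then zip-and-filter to keep the prefix count at each 'X' position.
import Mathlib
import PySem

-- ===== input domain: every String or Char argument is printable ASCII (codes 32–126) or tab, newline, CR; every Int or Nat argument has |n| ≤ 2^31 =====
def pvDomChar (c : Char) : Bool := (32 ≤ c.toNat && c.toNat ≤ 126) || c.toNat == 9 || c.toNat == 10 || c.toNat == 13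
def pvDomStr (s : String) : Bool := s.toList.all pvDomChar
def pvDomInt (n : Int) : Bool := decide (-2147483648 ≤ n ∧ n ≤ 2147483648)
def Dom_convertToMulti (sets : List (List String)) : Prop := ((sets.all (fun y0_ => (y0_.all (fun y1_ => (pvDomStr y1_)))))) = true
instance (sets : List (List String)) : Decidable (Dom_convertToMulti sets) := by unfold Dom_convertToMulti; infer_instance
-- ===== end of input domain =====

-- ===== PORT A =====
def convertToMulti (sets : List (List String)) : List (List Int) :=
  sets.foldl (fun output MS =>
    let r := MS.foldl (fun (st : Int × List Int) item =>
      if item == "X" then (st.1, st.2 ++ [st.1]) else (st.1 + 1, st.2)) (0, [])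
    output ++ [r.2]) []

-- ===== PORT B =====
-- Source B prefix loop: running sum s over the flags, appending each inclusive sum
def pvPrefix (s : Int) (flags : List Int) : List Int :=
  match flags with
  | [] => []
  | f :: rest => (s + f) :: pvPrefix (s + f) rest

def convertToMulti_alt (sets : List (List String)) : List (List Int) :=
  sets.map (fun MS =>
    let flags := MS.map (fun item => if item == "X" then (0 : Int) else 1)
    let pfx := pvPrefix 0 flags
    ((MS.zip pfx).filter (fun p => p.1 == "X")).map (fun p => p.2))

-- ===== PRECONDITION & SPEC =====
def Spec_convertToMulti (sets : List (List String)) (out : List (List Int)) : Prop := out = convertToMulti_alt sets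
instance (sets : List (List String)) (out : List (List Int)) : Decidable (Spec_convertToMulti sets out) := by unfold Spec_convertToMulti; infer_instance

-- ===== CLAIM (what is proved, stated in full; the proofs are below) =====
def Claim_equal_convertToMulti : Prop := ∀ (sets : List (List String)), Dom_convertToMulti sets → Spec_convertToMulti sets (convertToMulti sets)

-- ===== LEMMAS AND PROOFS =====

-- A's inner loop, generalised over the starting counter and accumulator,
-- equals B's zip-filter over the pfx table started at the same counter.
theorem pv_inner (MS : List String) (curr : Int) (acc : List Int) :
    (MS.foldl (fun (st : Int × List Int) item =>
      if item == "X" then (st.1, st.2 ++ [st.1]) else (st.1 + 1, st.2)) (curr, acc)).2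
    = acc ++ ((MS.zip (pvPrefix curr (MS.map (fun item => if item == "X" then (0 : Int) else 1)))).filter
        (fun p => p.1 == "X")).map (fun p => p.2) := by
  induction MS generalizing curr acc with
  | nil => simp
  | cons item rest ih =>
    by_cases h : item = "X"
    · subst h
      rw [List.foldl_cons, if_pos (by simp), ih curr (acc ++ [curr])]
      simp [pvPrefix]
    · rw [List.foldl_cons, if_neg (by simp [h]), ih (curr + 1) acc]
      simp [pvPrefix, h]

-- A's outer loop (append-accumulator) equals a map.
theorem pv_outer (sets : List (List String)) (acc : List (List Int)) :
    sets.foldl (fun output MS =>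
      let r := MS.foldl (fun (st : Int × List Int) item =>
        if item == "X" then (st.1, st.2 ++ [st.1]) else (st.1 + 1, st.2)) (0, [])
      output ++ [r.2]) acc
    = acc ++ sets.map (fun MS =>
        let flags := MS.map (fun item => if item == "X" then (0 : Int) else 1)
        let pfx := pvPrefix 0 flags
        ((MS.zip pfx).filter (fun p => p.1 == "X")).map (fun p => p.2)) := by
  induction sets generalizing acc with
  | nil => simp
  | cons MS rest ih =>
    rw [List.foldl_cons, ih (acc ++ _)]
    simp only [List.map_cons, List.append_assoc, List.singleton_append]
    rw [pv_inner MS 0 []]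
    simp

-- ===== VERDICT (by name: the statement is the Claim_ definition above) =====
theorem convertToMulti_spec : Claim_equal_convertToMulti := by
  intro sets _
  unfold Spec_convertToMulti convertToMulti convertToMulti_alt
  exact pv_outer sets []
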